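-- pv_equiv track=rewrite | github.com/ranga-sampath/agentic-network-tools | agentic-safety-shell/safe_exec_shell.py | _ip_is_risky
-- ===== SOURCE A (Python) =====
-- _IP_RISKY_SUBCOMMANDS = frozenset({"add", "del", "set", "change", "replace", "flush"})
--
-- _IP_SAFE_SUBCOMMANDS = frozenset({"show"})
--
-- def _ip_is_risky(args: list[str]) -> bool:
--     """ip: SAFE for show subcommand, RISKY for add/del/set/change/replace/flush."""
--     # ip [object] [subcommand] — e.g. ip addr show, ip route add
--     for a in args[1:]:
--         if a in _IP_RISKY_SUBCOMMANDS:
--             return True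
--     # Must have a show subcommand to be SAFE
--     for a in args[1:]:
--         if a in _IP_SAFE_SUBCOMMANDS:
--             return False
--     # No recognized safe subcommand -> RISKY
--     return True
-- ===== SOURCE B (Python) =====
-- _IP_RISKY_SUBCOMMANDS = frozenset({"add", "del", "set", "change", "replace", "flush"})
--
-- _IP_SAFE_SUBCOMMANDS = frozenset({"show"})
--
-- # Severity ranking: risky tokens rank 2, the safe token ranks 1, others 0.
-- _IP_SEVERITY = {"add": 2, "del": 2, "set": 2, "change": 2, "replace": 2, "flush": 2, "show": 1}
--
-- def _ip_is_risky(args: list[str]) -> bool: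
--     """ip: SAFE for show subcommand, RISKY for add/del/set/change/replace/flush."""
--     # One pass: take the maximum severity seen after the command word;
--     # exactly severity 1 (a 'show' with no risky token) is safe.
--     return max((_IP_SEVERITY.get(a, 0) for a in args[1:]), default=0) != 1
-- ===== Notes on version B (the rewrite author's own statement) =====
-- stated objective: alternative
-- what changed: Replaces A's two staged early-return membership scans by a single max-severity reduction: each token is mapped through a severity table (risky=2, show=1, other=0) and the command is risky iff the maximum severity over args[1:] is not exactly 1.
import Mathlib
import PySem

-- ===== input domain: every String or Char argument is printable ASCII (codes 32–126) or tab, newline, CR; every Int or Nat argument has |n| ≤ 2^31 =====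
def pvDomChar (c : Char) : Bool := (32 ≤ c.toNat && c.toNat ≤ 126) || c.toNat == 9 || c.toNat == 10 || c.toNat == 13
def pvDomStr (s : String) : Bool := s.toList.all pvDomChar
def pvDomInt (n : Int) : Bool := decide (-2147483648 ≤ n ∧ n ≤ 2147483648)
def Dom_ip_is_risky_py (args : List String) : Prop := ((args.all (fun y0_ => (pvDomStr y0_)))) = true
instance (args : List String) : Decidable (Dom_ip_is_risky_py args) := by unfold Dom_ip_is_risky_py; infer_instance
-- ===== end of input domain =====

-- B replaces A's two staged early-return membership scans with a single max-severity
-- reduction over a severity table (risky=2, show=1, other=0); risky ⟺ max ≠ 1 (alternative; same cost).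

-- ===== PORT A =====
def ipRiskySubs : List String := ["add", "del", "set", "change", "replace", "flush"]
def ipSafeSubs : List String := ["show"]

-- first loop: 'for a in args[1:]: if a in _IP_RISKY_SUBCOMMANDS: return True' (some true = early return)
def ipLoop1 : List String → Option Bool
  | [] => none
  | a :: rest => if ipRiskySubs.contains a then some true else ipLoop1 rest

-- second loop: 'for a in args[1:]: if a in _IP_SAFE_SUBCOMMANDS: return False' then 'return True'
def ipLoop2 : List String → Bool
  | [] => true
  | a :: rest => if ipSafeSubs.contains a then false else ipLoop2 rest

def ip_is_risky_py (args : List String) : Bool :=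
  let tail := PySem.List.slice args (some 1) none
  match ipLoop1 tail with
  | some b => b
  | none => ipLoop2 tail

-- ===== PORT B =====
-- _IP_SEVERITY = {"add": 2, "del": 2, "set": 2, "change": 2, "replace": 2, "flush": 2, "show": 1}
def ipSeverity : PySem.Dict String Int :=
  PySem.Dict.ofList [("add", 2), ("del", 2), ("set", 2), ("change", 2), ("replace", 2), ("flush", 2), ("show", 1)]

-- max(gen, default=0) over args[1:] as a fold
def ip_is_risky_py_alt (args : List String) : Bool :=
  let tail := PySem.List.slice args (some 1) none
  decide ((tail.foldl (fun m a => max m (PySem.Dict.getD ipSeverity a 0)) 0) ≠ (1 : Int))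

-- ===== PRECONDITION & SPEC =====
def Spec_ip_is_risky_py (args : List String) (out : Bool) : Prop := out = ip_is_risky_py_alt args
instance (args : List String) (out : Bool) : Decidable (Spec_ip_is_risky_py args out) := by unfold Spec_ip_is_risky_py; infer_instance

-- ===== CLAIM (what is proved, stated in full; the proofs are below) =====
def Claim_equal_ip_is_risky_py : Prop := ∀ (args : List String), Dom_ip_is_risky_py args → Spec_ip_is_risky_py args (ip_is_risky_py args)

-- ===== LEMMAS AND PROOFS =====

theorem ipSeverity_mk :
    ipSeverity = PySem.Dict.mk [("add", 2), ("del", 2), ("set", 2), ("change", 2),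
      ("replace", 2), ("flush", 2), ("show", 1)] := by decide

theorem ipRank_eq (a : String) :
    PySem.Dict.getD ipSeverity a 0
      = (if ipRiskySubs.contains a then 2 else if a = "show" then 1 else 0) := by
  by_cases h1 : a = "add"
  · subst h1; decide
  by_cases h2 : a = "del"
  · subst h2; decide
  by_cases h3 : a = "set"
  · subst h3; decide
  by_cases h4 : a = "change"
  · subst h4; decide
  by_cases h5 : a = "replace"
  · subst h5; decide
  by_cases h6 : a = "flush"
  · subst h6; decide
  by_cases h7 : a = "show"
  · subst h7; decide
  have g1 : ¬("add" = a) := fun h => h1 h.symm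
  have g2 : ¬("del" = a) := fun h => h2 h.symm
  have g3 : ¬("set" = a) := fun h => h3 h.symm
  have g4 : ¬("change" = a) := fun h => h4 h.symm
  have g5 : ¬("replace" = a) := fun h => h5 h.symm
  have g6 : ¬("flush" = a) := fun h => h6 h.symm
  have g7 : ¬("show" = a) := fun h => h7 h.symm
  simp [ipSeverity_mk, PySem.Dict.getD, PySem.Dict.get?,
    ipRiskySubs, g1, g2, g3, g4, g5, g6, g7, h1, h2, h3, h4, h5, h6, h7]

theorem ipRank_nonneg (a : String) : 0 ≤ PySem.Dict.getD ipSeverity a 0 := by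
  rw [ipRank_eq]; split_ifs <;> norm_num

theorem ipLoop1_eq (l : List String) :
    ipLoop1 l = if l.any (fun a => ipRiskySubs.contains a) then some true else none := by
  induction l with
  | nil => rfl
  | cons a rest ih =>
    simp only [ipLoop1, List.any_cons, ih]
    by_cases h : a ∈ ipRiskySubs <;> simp [h]

theorem ipLoop2_eq (l : List String) :
    ipLoop2 l = !l.any (fun a => a = "show") := by
  induction l with
  | nil => rfl
  | cons a rest ih =>
    simp only [ipLoop2, List.any_cons, ih, ipSafeSubs]
    by_cases h : a = "show" <;> simp [h]

theorem ipFold_init (l : List String) (m : Int) (hm : 0 ≤ m) :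
    l.foldl (fun m a => max m (PySem.Dict.getD ipSeverity a 0)) m
      = max m (l.foldl (fun m a => max m (PySem.Dict.getD ipSeverity a 0)) 0) := by
  induction l generalizing m with
  | nil => simp [hm]
  | cons a rest ih =>
    have hr := ipRank_nonneg a
    simp only [List.foldl_cons]
    rw [ih (max m _) (by omega), ih (max 0 _) (by omega)]
    omega

theorem ipFold_char (l : List String) :
    l.foldl (fun m a => max m (PySem.Dict.getD ipSeverity a 0)) 0
      = (if l.any (fun a => ipRiskySubs.contains a) then 2
         else if l.any (fun a => a = "show") then 1 else 0) := by
  induction l with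
  | nil => rfl
  | cons a rest ih =>
    have hr := ipRank_nonneg a
    simp only [List.foldl_cons, List.any_cons]
    rw [ipFold_init _ _ (by omega), ih, ipRank_eq]
    split_ifs <;> first
      | omega
      | (exfalso; simp_all <;> tauto)

theorem ip_key (l : List String) :
    (match ipLoop1 l with | some b => b | none => ipLoop2 l)
      = decide ((l.foldl (fun m a => max m (PySem.Dict.getD ipSeverity a 0)) 0) ≠ (1 : Int)) := by
  rw [ipLoop1_eq, ipLoop2_eq, ipFold_char]
  cases h1 : l.any (fun a => ipRiskySubs.contains a) <;>
    cases h2 : l.any (fun a => a = "show") <;>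
    simp [*]

-- ===== VERDICT (by name: the statement is the Claim_ definition above) =====
theorem ip_is_risky_py_spec : Claim_equal_ip_is_risky_py := by
  intro args _
  exact ip_key (PySem.List.slice args (some 1) none)
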